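-- pv_equiv track=rewrite | github.com/pmesgari/aoc2023 | solutions/day02.py | play_part1
-- ===== SOURCE A (Python) =====
-- from collections import defaultdict, Counter
--
-- def play_part1(sets):
--     """Try to play the game with the given sets"""
--     counter = Counter({'red': 12, 'blue': 14, 'green': 13})
--     for cubes in sets:
--         # draw the cubes
--         counter.subtract(cubes)
--         if any([value < 0 for _, value in counter.items()]):
--             return False
--         # put them back in the bag
--         counter.update(cubes)
--     return True
-- ===== SOURCE B (Python) =====
-- from collections import Counter
--
-- def play_part1(sets):
--     """Try to play the game with the given sets"""
--     limits = {'red': 12, 'blue': 14, 'green': 13}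
--     # stage 1: the minimal bag that could produce every draw = per-color maximum over all sets
--     maxima = {}
--     for cubes in sets:
--         for color, count in Counter(cubes).items():
--             maxima[color] = max(maxima.get(color, count), count)
--     # stage 2: the game is playable iff that minimal bag fits within the limits
--     for color, count in maxima.items():
--         if count > limits.get(color, 0):
--             return False
--     return True
-- ===== Notes on version B (the rewrite author's own statement) =====
-- stated objective: alternative
-- what changed: Replaces A's per-set mutable Counter round-trip (subtract the set, scan for negatives, add it back) with early return by a two-stage algorithm: first aggregate the per-color maximum over all sets (the minimal bag that could produce every draw), then one final comparison of that bag against the fixed limits; Pre_ excludes only association lists with duplicate color keys inside a set, which cannot arise from a Python dict argument.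
import Mathlib
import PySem

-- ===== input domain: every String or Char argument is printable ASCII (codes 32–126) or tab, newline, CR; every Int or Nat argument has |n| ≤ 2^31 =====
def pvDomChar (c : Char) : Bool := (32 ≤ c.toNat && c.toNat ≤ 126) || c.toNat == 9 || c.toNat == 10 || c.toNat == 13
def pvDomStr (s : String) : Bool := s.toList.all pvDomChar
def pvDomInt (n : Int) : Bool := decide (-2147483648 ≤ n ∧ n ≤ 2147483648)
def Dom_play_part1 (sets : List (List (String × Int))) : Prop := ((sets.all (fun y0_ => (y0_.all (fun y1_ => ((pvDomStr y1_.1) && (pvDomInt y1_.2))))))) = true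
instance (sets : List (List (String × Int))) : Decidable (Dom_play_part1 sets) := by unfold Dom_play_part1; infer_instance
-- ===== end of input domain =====

-- B replaces A's per-set mutable Counter round-trip (subtract, scan for negatives, add back) with a
-- two-stage algorithm: aggregate the per-color maximum over all sets, then compare that minimal bag
-- against the limits once (objective: alternative decomposition, same asymptotic cost).

-- ===== PORT A =====
-- counter = Counter({'red': 12, 'blue': 14, 'green': 13})
def pvCounterInit : PySem.Dict String Int :=
  PySem.Dict.ofList [("red", 12), ("blue", 14), ("green", 13)]

-- counter.subtract(cubes): self[k] = self.get(k, 0) - v for each item of the mapping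
def pvSubtract (counter : PySem.Dict String Int) (cubes : List (String × Int)) : PySem.Dict String Int :=
  cubes.foldl (fun d kv => d.insert kv.1 (d.getD kv.1 0 - kv.2)) counter

-- counter.update(cubes): self[k] = self.get(k, 0) + v for each item of the mapping
def pvUpdate (counter : PySem.Dict String Int) (cubes : List (String × Int)) : PySem.Dict String Int :=
  cubes.foldl (fun d kv => d.insert kv.1 (d.getD kv.1 0 + kv.2)) counter

def play_part1_go (counter : PySem.Dict String Int) : List (List (String × Int)) → Bool
  | [] => true
  | cubes :: rest =>
      let c := pvSubtract counter cubes
      if c.items.any (fun kv => decide (kv.2 < 0)) then false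
      else play_part1_go (pvUpdate c cubes) rest

def play_part1 (sets : List (List (String × Int))) : Bool :=
  play_part1_go pvCounterInit sets

-- ===== PORT B =====
-- limits = {'red': 12, 'blue': 14, 'green': 13}
def pvLimits : PySem.Dict String Int :=
  PySem.Dict.ofList [("red", 12), ("blue", 14), ("green", 13)]

-- maxima[color] = max(maxima.get(color, count), count)   (one item of the stage-1 loop)
def pvMaxStep (m : PySem.Dict String Int) (kv : String × Int) : PySem.Dict String Int :=
  m.insert kv.1 (max (m.getD kv.1 kv.2) kv.2)

-- stage 1: for cubes in sets: for color, count in Counter(cubes).items(): maxima[color] = max(...)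
-- stage 2: for color, count in maxima.items(): if count > limits.get(color, 0): return False; return True
def play_part1_alt (sets : List (List (String × Int))) : Bool :=
  let maxima := sets.foldl (fun m cubes => (PySem.Dict.ofList cubes).items.foldl pvMaxStep m)
    PySem.Dict.empty
  maxima.items.all (fun kv => decide (kv.2 ≤ pvLimits.getD kv.1 0))

-- ===== PRECONDITION & SPEC =====
-- Pre_ excludes association lists in which some set repeats a color key: such lists do not
-- correspond to any Python dict[str, int] argument (a dict cannot hold duplicate keys).
def Pre_play_part1 (sets : List (List (String × Int))) : Prop :=
  ∀ cubes ∈ sets, (cubes.map Prod.fst).Nodup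
instance (sets : List (List (String × Int))) : Decidable (Pre_play_part1 sets) := by
  unfold Pre_play_part1; infer_instance

def pvWitness_play_part1 : (List (List (String × Int))) :=
  [[("red", 3), ("green", 5)], [("blue", 14)]]

def Spec_play_part1 (sets : List (List (String × Int))) (out : Bool) : Prop := out = play_part1_alt sets
instance (sets : List (List (String × Int))) (out : Bool) : Decidable (Spec_play_part1 sets out) := by unfold Spec_play_part1; infer_instance

-- ===== CLAIM (what is proved, stated in full; the proofs are below) =====
def Claim_equal_play_part1 : Prop := ∀ (sets : List (List (String × Int))), Dom_play_part1 sets → Pre_play_part1 sets → Spec_play_part1 sets (play_part1 sets)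

-- ===== LEMMAS AND PROOFS =====

-- the bag's intended contents, as a total function on colors
def pvLim (k : String) : Int := pvLimits.getD k 0

-- the per-key effect of folding `insert k (op (getD k 0) v)` over an association list
def pvAfter (op : Int → Int → Int) (cubes : List (String × Int)) (g : String → Int) : String → Int :=
  fun k => match cubes.lookup k with | some v => op (g k) v | none => g k

-- invariant for A's bag: unique keys, stored values follow g, absent keys have g 0
def pvGood (d : PySem.Dict String Int) (g : String → Int) : Prop :=
  d.keys.Nodup ∧ (∀ kv ∈ d.items, kv.2 = g kv.1) ∧ (∀ k, k ∉ d.keys → g k = 0)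

-- invariant for B's maxima dict relative to the entries L already processed
def pvInv (d : PySem.Dict String Int) (L : List (String × Int)) : Prop :=
  d.keys.Nodup ∧ (∀ kv ∈ d.items, kv ∈ L ∧ ∀ v, (kv.1, v) ∈ L → v ≤ kv.2) ∧
  (∀ kv ∈ L, kv.1 ∈ d.keys)

lemma pvLim_eq (k : String) :
    pvLim k = if k = "green" then 13 else if k = "blue" then 14 else if k = "red" then 12 else 0 := by
  show (((PySem.Dict.empty.insert "red" 12).insert "blue" 14).insert "green" (13:Int)).getD k 0 = _
  simp [PySem.Dict.getD_insert, PySem.Dict.getD_empty]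

lemma pvLim_nonneg (k : String) : 0 ≤ pvLim k := by
  rw [pvLim_eq]; split_ifs <;> norm_num

lemma pvGood_getD {d : PySem.Dict String Int} {g : String → Int} (h : pvGood d g) (k : String) :
    d.getD k 0 = g k := by
  obtain ⟨hnd, hval, habs⟩ := h
  by_cases hk : k ∈ d.keys
  · obtain ⟨⟨k', v⟩, hmem, hfst⟩ := List.mem_map.mp hk
    simp only at hfst; subst hfst
    rw [PySem.Dict.getD_of_mem_items d hmem hnd]
    exact (hval _ hmem).symm ▸ rfl
  · rw [PySem.Dict.getD_of_not_contains]
    · exact (habs k hk).symm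
    · rw [PySem.Dict.contains_eq_decide_mem_keys]
      simp [hk]

lemma pvGood_foldl_op (op : Int → Int → Int) (cubes : List (String × Int))
    (d : PySem.Dict String Int) (g : String → Int) (hd : pvGood d g)
    (hnd : (cubes.map Prod.fst).Nodup) :
    pvGood (cubes.foldl (fun d kv => d.insert kv.1 (op (d.getD kv.1 0) kv.2)) d)
      (pvAfter op cubes g) := by
  induction cubes generalizing d g with
  | nil =>
      have : pvAfter op [] g = g := by funext k; rfl
      simpa [this] using hd
  | cons hd' tl ih =>
      obtain ⟨k, v⟩ := hd'
      simp only [List.map_cons, List.nodup_cons] at hnd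
      have hins : pvGood (d.insert k (op (g k) v)) (fun x => if x = k then op (g x) v else g x) := by
        obtain ⟨hn, hval, habs⟩ := hd
        refine ⟨PySem.Dict.nodup_keys_insert d k _ hn, ?_, ?_⟩
        · intro kv hkv
          rcases (PySem.Dict.mem_items_insert _ _ _ _).mp hkv with h1 | ⟨h2, hne⟩
          · subst h1; simp
          · simpa [hne] using hval _ h2
        · intro x hx
          rw [PySem.Dict.mem_keys_insert] at hx
          rw [not_or] at hx
          simp [hx.1, habs x hx.2]
      have hrec := ih _ _ hins hnd.2
      have hfun : pvAfter op tl (fun x => if x = k then op (g x) v else g x)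
          = pvAfter op ((k, v) :: tl) g := by
        funext x
        by_cases hx : x = k
        · subst hx
          have htl : tl.lookup x = none := by
            rw [List.lookup_eq_none_iff]
            intro p hp
            have : p.1 ∈ tl.map Prod.fst := List.mem_map.mpr ⟨p, hp, rfl⟩
            simp only [bne_iff_ne, ne_eq]
            intro he; exact hnd.1 (he ▸ this)
          simp [pvAfter, List.lookup, htl]
        · have hbe : (x == k) = false := beq_eq_false_iff_ne.mpr hx
          simp [pvAfter, List.lookup, hbe, hx]
      rw [List.foldl_cons, pvGood_getD hd k] at *
      exact hfun ▸ hrec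

lemma pvKeys_foldl_op (op : Int → Int → Int) (cubes : List (String × Int))
    (d : PySem.Dict String Int) :
    (cubes.foldl (fun d kv => d.insert kv.1 (op (d.getD kv.1 0) kv.2)) d).keys
      = PySem.Set.update d.keys (cubes.map Prod.fst) :=
  PySem.Dict.keys_foldl_insert_key cubes Prod.fst _ d

lemma pv_lookup_of_mem {cubes : List (String × Int)} {k : String} {v : Int}
    (hmem : (k, v) ∈ cubes) (hnd : (cubes.map Prod.fst).Nodup) :
    cubes.lookup k = some v := by
  induction cubes with
  | nil => simp at hmem
  | cons hd tl ih =>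
      obtain ⟨k', v'⟩ := hd
      simp only [List.map_cons, List.nodup_cons] at hnd
      rcases List.mem_cons.mp hmem with h | h
      · injection h with h1 h2; subst h1; subst h2; simp [List.lookup]
      · have hne : (k == k') = false := by
          have hk : k ∈ tl.map Prod.fst := List.mem_map.mpr ⟨(k, v), h, rfl⟩
          simp only [beq_eq_false_iff_ne, ne_eq]
          intro he; exact hnd.1 (he ▸ hk)
        simp [List.lookup, hne, ih h hnd.2]

lemma pv_mem_of_lookup {cubes : List (String × Int)} {k : String} {v : Int}
    (h : cubes.lookup k = some v) : (k, v) ∈ cubes := by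
  induction cubes with
  | nil => simp [List.lookup] at h
  | cons hd tl ih =>
      obtain ⟨k', v'⟩ := hd
      rcases hke : (k == k') with _ | _
      · simp only [List.lookup, hke] at h
        exact List.mem_cons_of_mem _ (ih h)
      · simp only [List.lookup, hke] at h
        have : k = k' := by simpa using hke
        subst this
        injection h with h'
        subst h'
        exact List.mem_cons_self ..

-- A's per-set negativity check equals the direct comparison against g
lemma pv_check_sub (cubes : List (String × Int)) (d : PySem.Dict String Int) (g : String → Int)
    (hd : pvGood d g) (hg : ∀ k, 0 ≤ g k) (hnd : (cubes.map Prod.fst).Nodup) :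
    ((pvSubtract d cubes).items.any (fun kv => decide (kv.2 < 0)))
      = cubes.any (fun kv => decide (g kv.1 < kv.2)) := by
  have hgood := pvGood_foldl_op (fun a b => a - b) cubes d g hd hnd
  apply Bool.eq_iff_iff.mpr
  simp only [List.any_eq_true, decide_eq_true_eq]
  constructor
  · rintro ⟨kv, hkv, hneg⟩
    have hval : kv.2 = match cubes.lookup kv.1 with | some v => g kv.1 - v | none => g kv.1 :=
      hgood.2.1 kv hkv
    rcases hcase : cubes.lookup kv.1 with _ | v
    · have hval' : kv.2 = g kv.1 := by rw [hval, hcase]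
      rw [hval'] at hneg
      exact absurd hneg (not_lt.mpr (hg kv.1))
    · have hval' : kv.2 = g kv.1 - v := by rw [hval, hcase]
      refine ⟨(kv.1, v), pv_mem_of_lookup hcase, ?_⟩
      simp only
      omega
  · rintro ⟨⟨k, v⟩, hmem, hlt⟩
    have hin : k ∈ cubes.map Prod.fst := List.mem_map.mpr ⟨(k, v), hmem, rfl⟩
    have hkeys : k ∈ (pvSubtract d cubes).keys := by
      rw [pvSubtract, pvKeys_foldl_op]
      exact (PySem.Set.mem_update _ _ _).mpr (Or.inr hin)
    obtain ⟨kv, hkv, hfst⟩ := List.mem_map.mp hkeys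
    refine ⟨kv, hkv, ?_⟩
    have hval : kv.2 = match cubes.lookup kv.1 with | some v => g kv.1 - v | none => g kv.1 :=
      hgood.2.1 kv hkv
    have hval' : kv.2 = g k - v := by rw [hval, hfst, pv_lookup_of_mem hmem hnd]
    simp only at hlt
    omega

-- after subtracting and adding the same set back, the invariant holds for the same g
lemma pv_good_roundtrip (cubes : List (String × Int)) (d : PySem.Dict String Int)
    (g : String → Int) (hd : pvGood d g) (hnd : (cubes.map Prod.fst).Nodup) :
    pvGood (pvUpdate (pvSubtract d cubes) cubes) g := by
  have h1 := pvGood_foldl_op (fun a b => a - b) cubes d g hd hnd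
  have h2 := pvGood_foldl_op (fun a b => a + b) cubes (pvSubtract d cubes) _ h1 hnd
  have heq : pvAfter (fun a b => a + b) cubes (pvAfter (fun a b => a - b) cubes g) = g := by
    funext k
    rcases h : cubes.lookup k with _ | v <;> simp [pvAfter, h]
  rw [pvUpdate]
  exact heq ▸ h2

lemma pvGood_init : pvGood pvCounterInit pvLim := by
  refine ⟨by decide, ?_, ?_⟩
  · intro kv hkv
    have hitems : pvCounterInit.items = [("red", 12), ("blue", 14), ("green", 13)] := by decide
    rw [hitems] at hkv
    simp only [List.mem_cons, List.not_mem_nil, or_false] at hkv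
    rcases hkv with h | h | h <;> subst h <;> decide
  · intro k hk
    have hkeys : pvCounterInit.keys = ["red", "blue", "green"] := by decide
    rw [hkeys] at hk
    simp only [List.mem_cons, List.not_mem_nil, or_false, not_or] at hk
    rw [pvLim_eq]
    simp [hk.1, hk.2.1, hk.2.2]

-- A equals the direct "some entry exceeds its limit" test
lemma pv_go_eq (sets : List (List (String × Int))) (d : PySem.Dict String Int)
    (hd : pvGood d pvLim) (hpre : ∀ cubes ∈ sets, (cubes.map Prod.fst).Nodup) :
    play_part1_go d sets
      = ! sets.any (fun cubes => cubes.any (fun kv => decide (pvLim kv.1 < kv.2))) := by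
  induction sets generalizing d with
  | nil => rfl
  | cons cubes rest ih =>
      have hnd := hpre cubes (List.mem_cons_self ..)
      rw [play_part1_go]
      rw [pv_check_sub cubes d pvLim hd pvLim_nonneg hnd]
      by_cases h : cubes.any (fun kv => decide (pvLim kv.1 < kv.2)) = true
      · simp [h]
      · simp only [Bool.not_eq_true] at h
        simp only [h, Bool.false_eq_true, if_false, List.any_cons, Bool.false_or]
        exact ih _ (pv_good_roundtrip cubes d pvLim hd hnd)
          (fun c hc => hpre c (List.mem_cons_of_mem _ hc))

-- ofList of a duplicate-free association list has exactly that list as items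
lemma pv_items_ofList (cubes : List (String × Int)) (hnd : (cubes.map Prod.fst).Nodup) :
    (PySem.Dict.ofList cubes).items = cubes := by
  show (cubes.foldl (fun d p => d.insert p.1 p.2) PySem.Dict.empty).items = cubes
  rw [PySem.Dict.items_foldl_insert_fresh cubes Prod.fst Prod.snd PySem.Dict.empty
    (fun a _ => PySem.Dict.contains_empty _) hnd]
  simp [PySem.Dict.empty]

-- one stage-1 step preserves pvInv, extending the processed list by one entry
lemma pvInv_step (d : PySem.Dict String Int) (L : List (String × Int)) (kv : String × Int)
    (h : pvInv d L) : pvInv (pvMaxStep d kv) (L ++ [kv]) := by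
  obtain ⟨k, v⟩ := kv
  obtain ⟨hnd, hval, hkey⟩ := h
  unfold pvMaxStep
  refine ⟨PySem.Dict.nodup_keys_insert d k _ hnd, ?_, ?_⟩
  · intro kv' hkv'
    rcases (PySem.Dict.mem_items_insert _ _ _ _).mp hkv' with h1 | ⟨h2, hne⟩
    · subst h1
      by_cases hk : k ∈ d.keys
      · obtain ⟨⟨k', m⟩, hmem, hfst⟩ := List.mem_map.mp hk
        simp only at hfst
        rw [← hfst]
        have hgd : d.getD k' v = m := PySem.Dict.getD_of_mem_items d hmem hnd v
        rw [hgd]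
        obtain ⟨hmL, hmax⟩ := hval _ hmem
        constructor
        · rcases le_total v m with hle | hle
          · rw [max_eq_left hle]; exact List.mem_append_left _ hmL
          · rw [max_eq_right hle]; exact List.mem_append_right _ (by simp)
        · intro v' hv'
          rcases List.mem_append.mp hv' with hL | hr
          · exact le_trans (hmax v' hL) (le_max_left _ _)
          · simp only [List.mem_singleton, Prod.mk.injEq] at hr
            rw [hr.2]; exact le_max_right _ _
      · have hgd : d.getD k v = v := by
          rw [PySem.Dict.getD_of_not_contains]
          rw [PySem.Dict.contains_eq_decide_mem_keys]; simp [hk]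
        rw [hgd, max_self]
        refine ⟨List.mem_append_right _ (by simp), ?_⟩
        intro v' hv'
        rcases List.mem_append.mp hv' with hL | hr
        · exact absurd (hkey _ hL) hk
        · simp only [List.mem_singleton, Prod.mk.injEq] at hr
          omega
    · obtain ⟨hmL, hmax⟩ := hval _ h2
      refine ⟨List.mem_append_left _ hmL, ?_⟩
      intro v' hv'
      rcases List.mem_append.mp hv' with hL | hr
      · exact hmax v' hL
      · simp only [List.mem_singleton, Prod.mk.injEq] at hr
        exact absurd hr.1 hne
  · intro kv' hkv'
    rw [PySem.Dict.mem_keys_insert]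
    rcases List.mem_append.mp hkv' with hL | hr
    · exact Or.inr (hkey _ hL)
    · simp only [List.mem_singleton] at hr
      subst hr; exact Or.inl rfl

lemma pvInv_foldl (L : List (String × Int)) :
    ∀ (d : PySem.Dict String Int) (L0 : List (String × Int)),
      pvInv d L0 → pvInv (L.foldl pvMaxStep d) (L0 ++ L) := by
  induction L with
  | nil => intro d L0 h; simpa using h
  | cons kv tl ih =>
      intro d L0 h
      have := ih (pvMaxStep d kv) (L0 ++ [kv]) (pvInv_step d L0 kv h)
      simpa using this

-- stage 1 of B is a fold of pvMaxStep over the flattened entry list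
lemma pv_alt_fold_eq (sets : List (List (String × Int)))
    (hpre : ∀ cubes ∈ sets, (cubes.map Prod.fst).Nodup) (m0 : PySem.Dict String Int) :
    sets.foldl (fun m cubes => (PySem.Dict.ofList cubes).items.foldl pvMaxStep m) m0
      = (sets.flatMap id).foldl pvMaxStep m0 := by
  induction sets generalizing m0 with
  | nil => rfl
  | cons cubes rest ih =>
      rw [List.foldl_cons, List.flatMap_cons, List.foldl_append, id,
        pv_items_ofList cubes (hpre cubes (List.mem_cons_self ..))]
      exact ih (fun c hc => hpre c (List.mem_cons_of_mem _ hc)) _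

-- stage 2 of B equals the negated "some entry exceeds its limit" test
lemma pv_final (d : PySem.Dict String Int) (L : List (String × Int)) (h : pvInv d L) :
    (d.items.all (fun kv => decide (kv.2 ≤ pvLim kv.1)))
      = ! (L.any (fun kv => decide (pvLim kv.1 < kv.2))) := by
  obtain ⟨hnd, hval, hkey⟩ := h
  apply Bool.eq_iff_iff.mpr
  simp only [List.all_eq_true, Bool.not_eq_true', List.any_eq_false, decide_eq_true_eq,
    not_lt]
  constructor
  · intro hall kv hkv
    obtain ⟨⟨k', m⟩, hmem, hfst⟩ := List.mem_map.mp (hkey _ hkv)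
    simp only at hfst
    have hle := (hval _ hmem).2 kv.2 (by rw [hfst]; exact (Prod.mk.eta (p := kv)) ▸ hkv)
    calc kv.2 ≤ m := hle
      _ ≤ pvLim k' := hall _ hmem
      _ = pvLim kv.1 := by rw [hfst]
  · intro hnb kv hkv
    exact hnb kv (hval _ hkv).1

-- "some set has some entry exceeding its limit", flattened
lemma pv_any_flatMap (sets : List (List (String × Int))) :
    (sets.flatMap id).any (fun kv => decide (pvLim kv.1 < kv.2))
      = sets.any (fun cubes => cubes.any (fun kv => decide (pvLim kv.1 < kv.2))) := by
  simp

-- ===== VERDICT (by name: the statement is the Claim_ definition above) =====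
theorem play_part1_spec : Claim_equal_play_part1 := by
  intro sets _ hpre
  unfold Spec_play_part1 play_part1 play_part1_alt
  have hinv : pvInv ((sets.flatMap id).foldl pvMaxStep PySem.Dict.empty) (sets.flatMap id) := by
    have h0 : pvInv PySem.Dict.empty [] := by
      refine ⟨by decide, ?_, ?_⟩ <;> intro kv hkv <;> simp [PySem.Dict.empty] at hkv
    simpa using pvInv_foldl (sets.flatMap id) PySem.Dict.empty [] h0
  rw [pv_go_eq sets pvCounterInit pvGood_init hpre]
  simp only [pv_alt_fold_eq sets hpre]
  show _ = ((sets.flatMap id).foldl pvMaxStep PySem.Dict.empty).items.all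
    (fun kv => decide (kv.2 ≤ pvLim kv.1))
  rw [pv_final _ _ hinv, pv_any_flatMap]
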